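-- pv_equiv track=rewrite | github.com/svenpeter42/pc2d | tools.py | blockYielder
-- ===== SOURCE A (Python) =====
-- def blockYielder(begin, end, blockShape):
--
--     blockIndex = 0
--     for xBegin in range(begin[0], end[0], blockShape[0]):
--         xEnd = min(xBegin + blockShape[0],end[0])
--         for yBegin in range(begin[1], end[1], blockShape[1]):
--             yEnd = min(yBegin + blockShape[1],end[1])
--             yield blockIndex, (xBegin, yBegin), (xEnd, yEnd)
--             blockIndex += 1
-- ===== SOURCE B (Python) =====
-- def blockYielder(begin, end, blockShape):
--     xStarts = range(begin[0], end[0], blockShape[0])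
--     yStarts = range(begin[1], end[1], blockShape[1])
--     ny = len(yStarts)
--     for blockIndex in range(len(xStarts) * ny):
--         i, j = divmod(blockIndex, ny)
--         x = xStarts[i]
--         y = yStarts[j]
--         yield blockIndex, (x, y), (min(x + blockShape[0], end[0]),
--                                    min(y + blockShape[1], end[1]))
-- ===== Notes on version B (the rewrite author's own statement) =====
-- stated objective: alternative
-- what changed: Replaces the nested x/y loops with lazy range objects for the two axes and one flat loop over blockIndex, recovering the block coordinates by divmod(blockIndex, len(yStarts)).
-- outside the precondition, e.g. on blockYielder((10, 130), (10, 10), (5, 0)): A returns [], B raises ValueError; on blockYielder((0, 0), (2, 2), (0, 1)): A raises ValueError, B raises ValueError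
import Mathlib
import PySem

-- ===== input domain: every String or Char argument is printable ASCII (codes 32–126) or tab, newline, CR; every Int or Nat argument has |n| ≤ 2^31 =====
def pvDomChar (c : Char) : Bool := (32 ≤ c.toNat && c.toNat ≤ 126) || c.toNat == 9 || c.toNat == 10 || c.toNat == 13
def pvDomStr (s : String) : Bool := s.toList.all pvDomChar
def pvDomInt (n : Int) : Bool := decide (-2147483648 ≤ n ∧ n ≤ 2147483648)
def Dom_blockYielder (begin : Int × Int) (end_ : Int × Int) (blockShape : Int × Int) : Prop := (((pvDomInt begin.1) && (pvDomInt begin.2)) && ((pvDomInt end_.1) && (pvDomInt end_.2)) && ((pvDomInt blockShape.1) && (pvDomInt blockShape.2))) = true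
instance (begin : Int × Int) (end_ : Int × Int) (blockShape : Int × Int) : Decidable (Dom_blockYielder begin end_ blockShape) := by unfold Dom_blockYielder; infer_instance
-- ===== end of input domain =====

-- B replaces the nested x/y loops with one flat loop over a linear block index,
-- recovering the 2D coordinates by divmod; equivalence of the return values (A is a generator, ported as the list of yielded triples).

-- ===== PORT A =====
def blockYielder (begin : Int × Int) (end_ : Int × Int) (blockShape : Int × Int) :
    List (Int × (Int × Int) × (Int × Int)) :=
  ((PySem.List.pyRange begin.1 end_.1 blockShape.1).foldl
    (fun p xBegin =>
      let xEnd := min (xBegin + blockShape.1) end_.1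
      (PySem.List.pyRange begin.2 end_.2 blockShape.2).foldl
        (fun q yBegin =>
          let yEnd := min (yBegin + blockShape.2) end_.2
          (q.1 ++ [(q.2, (xBegin, yBegin), (xEnd, yEnd))], q.2 + 1)) p)
    (([] : List (Int × (Int × Int) × (Int × Int))), (0 : Int))).1

-- ===== PORT B =====
-- Source B keeps xStarts/yStarts as lazy range OBJECTS: len(range(a,b,s)) and
-- range[i] are O(1) arithmetic in Python; rangeLen / the 'a + s*i' subscript
-- below port exactly that arithmetic (CPython's range length and __getitem__;
-- i is always in range in Source B).
def rangeLen (a b s : Int) : Int :=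
  if s = 0 then 0
  else if 0 < s then (if a < b then (b - a + s - 1) / s else 0)
  else (if b < a then (a - b + (-s) - 1) / (-s) else 0)

def blockYielder_alt (begin : Int × Int) (end_ : Int × Int) (blockShape : Int × Int) :
    List (Int × (Int × Int) × (Int × Int)) :=
  let nx := rangeLen begin.1 end_.1 blockShape.1
  let ny := rangeLen begin.2 end_.2 blockShape.2
  (PySem.List.pyRange 0 (nx * ny) 1).map (fun blockIndex =>
    let i := PySem.Int.floordiv blockIndex ny
    let j := PySem.Int.mod blockIndex ny
    let x := begin.1 + blockShape.1 * i   -- xStarts[i]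
    let y := begin.2 + blockShape.2 * j   -- yStarts[j]
    (blockIndex, (x, y), (min (x + blockShape.1) end_.1, min (y + blockShape.2) end_.2)))

-- ===== PRECONDITION & SPEC =====
-- Pre_ excludes blockShape components equal to 0: Python's range(step=0) raises ValueError; A only escapes the error when the other axis is already empty (returning []), while B builds both ranges up front and raises there too.
def Pre_blockYielder (begin : Int × Int) (end_ : Int × Int) (blockShape : Int × Int) : Prop :=
  blockShape.1 ≠ 0 ∧ blockShape.2 ≠ 0
instance (begin : Int × Int) (end_ : Int × Int) (blockShape : Int × Int) : Decidable (Pre_blockYielder begin end_ blockShape) := by unfold Pre_blockYielder; infer_instance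
def pvWitness_blockYielder : (Int × Int) × (Int × Int) × (Int × Int) := ((0, 0), (5, 4), (2, 3))

def Spec_blockYielder (begin : Int × Int) (end_ : Int × Int) (blockShape : Int × Int) (out : List (Int × (Int × Int) × (Int × Int))) : Prop := out = blockYielder_alt begin end_ blockShape
instance (begin : Int × Int) (end_ : Int × Int) (blockShape : Int × Int) (out : List (Int × (Int × Int) × (Int × Int))) : Decidable (Spec_blockYielder begin end_ blockShape out) := by unfold Spec_blockYielder; infer_instance

-- ===== CLAIM (what is proved, stated in full; the proofs are below) =====
def Claim_equal_blockYielder : Prop := ∀ (begin : Int × Int) (end_ : Int × Int) (blockShape : Int × Int), Dom_blockYielder begin end_ blockShape → Pre_blockYielder begin end_ blockShape → Spec_blockYielder begin end_ blockShape (blockYielder begin end_ blockShape)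

-- ===== LEMMAS AND PROOFS =====

-- A's inner loop appends one enumerated entry per y, carrying the running block index.
theorem innerA {R : Type} (g : Int → R) :
    ∀ (ys : List Int) (acc : List (Int × R)) (c : Int),
      ys.foldl (fun q y => (q.1 ++ [(q.2, g y)], q.2 + 1)) (acc, c)
        = (acc ++ PySem.List.enumerate (ys.map g) c, c + ys.length) := by
  intro ys
  induction ys with
  | nil => intro acc c; simp [PySem.List.enumerate_nil]
  | cons y ys ih =>
    intro acc c
    simp only [List.foldl_cons, List.map_cons, PySem.List.enumerate_cons, ih, Prod.mk.injEq]
    refine ⟨by simp, by simp only [List.length_cons]; push_cast; ring⟩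

-- A's whole loop nest is the enumeration of the flatMap of per-x rows.
theorem outerA {R : Type} (g : Int → Int → R) (ys : List Int) :
    ∀ (xs : List Int) (acc : List (Int × R)) (c : Int),
      xs.foldl (fun p x =>
          ys.foldl (fun q y => (q.1 ++ [(q.2, g x y)], q.2 + 1)) p) (acc, c)
        = (acc ++ PySem.List.enumerate (xs.flatMap fun x => ys.map (g x)) c,
           c + xs.length * ys.length) := by
  intro xs
  induction xs with
  | nil => intro acc c; simp [PySem.List.enumerate_nil]
  | cons x xs ih =>
    intro acc c
    simp only [List.foldl_cons, List.flatMap_cons]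
    rw [innerA, ih, PySem.List.enumerate_append]
    simp only [Prod.mk.injEq, List.length_map]
    refine ⟨by simp, by simp only [List.length_cons]; push_cast; ring⟩

theorem flat_len {R : Type} (g : Int → Int → R) (ys : List Int) :
    ∀ (xs : List Int), (xs.flatMap fun x => ys.map (g x)).length = xs.length * ys.length := by
  intro xs
  induction xs with
  | nil => simp
  | cons x xs ih => simp [ih]; ring

-- index recovery: element k of the flatMap is g xs[k / ny] ys[k % ny]
theorem flat_get {R : Type} (g : Int → Int → R) (ys : List Int) :
    ∀ (xs : List Int) (k : Nat) (_hk : k < xs.length * ys.length)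
      (h1 : k / ys.length < xs.length) (h2 : k % ys.length < ys.length)
      (h3 : k < (xs.flatMap fun x => ys.map (g x)).length),
      (xs.flatMap fun x => ys.map (g x))[k]'h3 = g (xs[k / ys.length]'h1) (ys[k % ys.length]'h2) := by
  intro xs
  induction xs with
  | nil => intro k hk; simp at hk
  | cons x xs ih =>
    intro k hk h1 h2 h3
    have hny : 0 < ys.length := by
      rcases Nat.eq_zero_or_pos ys.length with h | h
      · simp [h] at hk
      · exact h
    by_cases hlt : k < ys.length
    · have hdiv : k / ys.length = 0 := Nat.div_eq_of_lt hlt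
      have hmod : k % ys.length = k := Nat.mod_eq_of_lt hlt
      simp only [List.flatMap_cons]
      rw [List.getElem_append_left (by simpa using hlt)]
      simp [hdiv, hmod]
    · obtain ⟨m, rfl⟩ : ∃ m, k = m + ys.length := ⟨k - ys.length, by omega⟩
      have hdiv : (m + ys.length) / ys.length = m / ys.length + 1 :=
        Nat.add_div_right m hny
      have hmod : (m + ys.length) % ys.length = m % ys.length :=
        Nat.add_mod_right m ys.length
      simp only [List.flatMap_cons]
      rw [List.getElem_append_right (by simp)]
      have hm : m < xs.length * ys.length := by
        simp only [List.length_cons, Nat.succ_mul] at hk; omega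
      have h1' : m / ys.length < xs.length :=
        Nat.div_lt_of_lt_mul (by rw [Nat.mul_comm]; exact hm)
      have h2' : m % ys.length < ys.length := Nat.mod_lt _ hny
      have h3' : m < (xs.flatMap fun x => ys.map (g x)).length := by
        rw [flat_len]; exact hm
      simp only [List.length_map, Nat.add_sub_cancel, hdiv, hmod,
        List.getElem_cons_succ]
      exact ih m hm h1' h2' h3'

-- B's flat map equals the enumeration of the flatMap.
theorem lemB {R : Type} (g : Int → Int → R) (ys xs : List Int) (dI : Int) (dR : R) :
    (PySem.List.pyRange 0 ((xs.length : Int) * (ys.length : Int)) 1).map (fun k =>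
        ((k : Int),
         g (PySem.List.pyGetD xs (PySem.Int.floordiv k (ys.length : Int)) dI)
           (PySem.List.pyGetD ys (PySem.Int.mod k (ys.length : Int)) dI)))
      = PySem.List.enumerate (xs.flatMap fun x => ys.map (g x)) 0 := by
  rw [PySem.List.enumerate_eq_map_pyRange _ dR]
  have hlen : ((xs.flatMap fun x => ys.map (g x)).length : Int)
      = (xs.length : Int) * (ys.length : Int) := by
    rw [flat_len]; push_cast; ring
  rw [PySem.List.len_eq, hlen]
  apply List.map_congr_left
  intro k hk
  rw [PySem.List.mem_pyRange_one] at hk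
  obtain ⟨hk0, hkup⟩ := hk
  obtain ⟨kn, rfl⟩ : ∃ kn : Nat, k = (kn : Int) := ⟨k.toNat, by omega⟩
  have hkn : kn < xs.length * ys.length := by exact_mod_cast hkup
  have hny : 0 < ys.length := by
    rcases Nat.eq_zero_or_pos ys.length with h | h
    · simp [h] at hkn
    · exact h
  have h1 : kn / ys.length < xs.length :=
    Nat.div_lt_of_lt_mul (by rw [Nat.mul_comm]; exact hkn)
  have h2 : kn % ys.length < ys.length := Nat.mod_lt _ hny
  have h3 : kn < (xs.flatMap fun x => ys.map (g x)).length := by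
    rw [flat_len]; exact hkn
  rw [PySem.Int.floordiv_natCast, PySem.Int.mod_natCast]
  rw [PySem.List.pyGetD_natCast, PySem.List.pyGetD_natCast, PySem.List.pyGetD_natCast]
  rw [List.getD_eq_getElem _ _ h1, List.getD_eq_getElem _ _ h2, List.getD_eq_getElem _ _ h3]
  rw [flat_get g ys xs kn hkn h1 h2 h3]


theorem rangeLen_spec (a b s : Int) :
    ((PySem.List.pyRange a b s).length : Int) = rangeLen a b s := by
  unfold PySem.List.pyRange rangeLen
  split_ifs with h1 h2 h3 h4 <;>
    simp only [List.length_map, List.length_range, Int.natCast_zero, List.length_nil]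
  · apply Int.toNat_of_nonneg; apply Int.ediv_nonneg <;> omega
  · apply Int.toNat_of_nonneg; apply Int.ediv_nonneg <;> omega

theorem rangeLen_nonneg (a b s : Int) : 0 ≤ rangeLen a b s := by
  rw [← rangeLen_spec]; positivity

theorem rangeGet_spec (a b s i : Int) (h0 : 0 ≤ i) (h : i < rangeLen a b s) :
    PySem.List.pyGetD (PySem.List.pyRange a b s) i 0 = a + s * i := by
  have hlen : i < ((PySem.List.pyRange a b s).length : Int) := by
    rw [rangeLen_spec]; exact h
  rw [PySem.List.pyGetD_eq_getElem _ _ h0 (by simpa using hlen)]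
  unfold PySem.List.pyRange
  split_ifs with h1 h2 h3 h4
  · exfalso; unfold rangeLen at h; rw [if_pos h1] at h; omega
  · simp only [List.getElem_map, List.getElem_range]; rw [Int.toNat_of_nonneg h0]
  · exfalso; unfold rangeLen at h; rw [if_neg h1, if_pos h2, if_neg h3] at h; omega
  · simp only [List.getElem_map, List.getElem_range]; rw [Int.toNat_of_nonneg h0]
  · exfalso; unfold rangeLen at h; rw [if_neg h1, if_neg h2, if_neg h4] at h; omega

theorem blockYielder_spec : Claim_equal_blockYielder := by
  intro b e s _ _
  unfold Spec_blockYielder blockYielder blockYielder_alt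
  rw [outerA (fun x y => ((x, y), (min (x + s.1) e.1, min (y + s.2) e.2)))
      (PySem.List.pyRange b.2 e.2 s.2) (PySem.List.pyRange b.1 e.1 s.1) [] 0]
  simp only [List.nil_append]
  rw [← lemB (fun x y => ((x, y), (min (x + s.1) e.1, min (y + s.2) e.2)))
      (PySem.List.pyRange b.2 e.2 s.2) (PySem.List.pyRange b.1 e.1 s.1) 0
      ((0, 0), (0, 0))]
  simp only [rangeLen_spec]
  apply List.map_congr_left
  intro k hk
  rw [PySem.List.mem_pyRange_one] at hk
  obtain ⟨hk0, hkup⟩ := hk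
  have hny : 0 < rangeLen b.2 e.2 s.2 := by
    rcases lt_or_eq_of_le (rangeLen_nonneg b.2 e.2 s.2) with h | h
    · exact h
    · rw [← h, mul_zero] at hkup; omega
  have hdiv : PySem.Int.floordiv k (rangeLen b.2 e.2 s.2) = k / rangeLen b.2 e.2 s.2 :=
    PySem.Int.floordiv_eq_ediv_of_pos hny
  have hmod : PySem.Int.mod k (rangeLen b.2 e.2 s.2) = k % rangeLen b.2 e.2 s.2 :=
    PySem.Int.mod_eq_emod_of_pos hny
  have hq0 : 0 ≤ k / rangeLen b.2 e.2 s.2 := Int.ediv_nonneg hk0 (le_of_lt hny)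
  have hq1 : k / rangeLen b.2 e.2 s.2 < rangeLen b.1 e.1 s.1 := by
    rw [Int.ediv_lt_iff_lt_mul hny]; exact hkup
  have hr0 : 0 ≤ k % rangeLen b.2 e.2 s.2 := Int.emod_nonneg k (ne_of_gt hny)
  have hr1 : k % rangeLen b.2 e.2 s.2 < rangeLen b.2 e.2 s.2 := Int.emod_lt_of_pos k hny
  rw [hdiv, hmod, rangeGet_spec _ _ _ _ hq0 hq1, rangeGet_spec _ _ _ _ hr0 hr1]
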